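-- pv_equiv track=rewrite | github.com/wangran845/Ebay-amazon-oem | AmazonOMETT/code/oem_usage_filter.py | _detect_vbs_column
-- ===== SOURCE A (Python) =====
-- def _detect_vbs_column(columns: list[str]) -> str | None:
--     """动态检测VBS列名（支持 VBS No. / VBSNO / VBS）"""
--     columns_lower = [c.strip().lower() for c in columns]
--
--     # 优先级顺序
--     candidates = ['WBS No.','WBS No.','vbs no.', 'vbsno', 'vbs no', 'vbs']
--
--     for candidate in candidates:
--         for i, col_lower in enumerate(columns_lower):
--             if candidate == col_lower or candidate.replace(' ', '') == col_lower.replace(' ', ''):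
--                 return columns[i]  # 返回原始列名
--
--     return None
-- ===== SOURCE B (Python) =====
-- def _detect_vbs_column(columns: list[str]) -> str | None:
--     """动态检测VBS列名（支持 VBS No. / VBSNO / VBS）"""
--     # priority rank of each normalized candidate key (earliest candidate wins)
--     candidates = ['WBS No.', 'WBS No.', 'vbs no.', 'vbsno', 'vbs no', 'vbs']
--     ranks = {}
--     for r, cand in enumerate(candidates):
--         ranks.setdefault(cand.replace(' ', ''), r)
--
--     # single pass over the columns, keeping the column with the best (lowest) rank;
--     # strict '<' keeps the first column among those of equal rank
--     best_rank = None
--     best_col = None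
--     for c in columns:
--         r = ranks.get(c.strip().lower().replace(' ', ''))
--         if r is not None and (best_rank is None or r < best_rank):
--             best_rank, best_col = r, c
--     return best_col
-- ===== Notes on version B (the rewrite author's own statement) =====
-- stated objective: faster
-- what changed: Inverts the loop nesting: instead of rescanning all columns once per candidate, B assigns each normalized candidate key a priority rank (built once from the constant candidate list) and makes a single pass over the columns keeping the column with the smallest rank (strict comparison keeps the first column on ties).
import Mathlib
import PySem

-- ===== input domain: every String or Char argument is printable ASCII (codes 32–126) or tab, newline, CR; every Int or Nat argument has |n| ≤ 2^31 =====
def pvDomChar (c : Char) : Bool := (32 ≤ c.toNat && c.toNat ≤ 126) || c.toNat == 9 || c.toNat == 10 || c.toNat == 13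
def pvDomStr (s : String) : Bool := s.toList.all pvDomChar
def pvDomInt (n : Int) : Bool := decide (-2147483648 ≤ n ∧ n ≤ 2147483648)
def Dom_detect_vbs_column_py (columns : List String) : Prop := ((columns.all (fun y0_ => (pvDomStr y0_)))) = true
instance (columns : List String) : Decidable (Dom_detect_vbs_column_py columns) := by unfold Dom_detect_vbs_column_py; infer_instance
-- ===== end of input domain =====

-- B inverts A's loops: instead of scanning all columns once per candidate, it assigns each
-- candidate key a priority rank and makes ONE pass over the columns keeping the minimum-rank
-- column (objective: faster single pass, measured).


-- shared normalization helpers: c.strip().lower() and s.replace(' ', '')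
def pvStripLower (c : String) : String := PySem.Str.lower (PySem.Str.strip c)
def pvRepl (s : String) : String := PySem.Str.replace s " " ""
def pvNorm (c : String) : String := pvRepl (pvStripLower c)

-- ===== PORT A =====
-- inner loop: for i, col_lower in enumerate(columns_lower): if match: return columns[i]
def pvAScan (columns : List String) (cand : String) : List (Int × String) → Option String
  | [] => none
  | (i, col) :: rest =>
      if cand = col ∨ pvRepl cand = pvRepl col then PySem.List.pyGet? columns i
      else pvAScan columns cand rest

-- outer loop over candidates
def pvALoop (columns : List String) (pairs : List (Int × String)) : List String → Option String
  | [] => none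
  | cand :: rest =>
      match pvAScan columns cand pairs with
      | some r => some r
      | none => pvALoop columns pairs rest

def detect_vbs_column_py (columns : List String) : Option String :=
  let columns_lower := columns.map (fun c => pvStripLower c)
  let candidates := ["WBS No.", "WBS No.", "vbs no.", "vbsno", "vbs no", "vbs"]
  pvALoop columns (PySem.List.enumerate columns_lower 0) candidates

-- ===== PORT B =====
-- ranks = {} ; for r, cand in enumerate(candidates): ranks.setdefault(cand.replace(' ',''), r)
def pvRanks : PySem.Dict String Int :=
  (PySem.List.enumerate ["WBS No.", "WBS No.", "vbs no.", "vbsno", "vbs no", "vbs"] 0).foldl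
    (fun d p => d.setdefault (pvRepl p.2) p.1) PySem.Dict.empty

-- loop body: r = ranks.get(norm(c)); if r is not None and (best_rank is None or r < best_rank): best = (r, c)
def pvBStep (acc : Option (Int × String)) (c : String) : Option (Int × String) :=
  match pvRanks.get? (pvNorm c) with
  | none => acc
  | some r =>
      match acc with
      | none => some (r, c)
      | some (br, bc) => if r < br then some (r, c) else some (br, bc)

def detect_vbs_column_py_alt (columns : List String) : Option String :=
  (columns.foldl pvBStep none).map Prod.snd

-- ===== PRECONDITION & SPEC =====
def Spec_detect_vbs_column_py (columns : List String) (out : Option String) : Prop := out = detect_vbs_column_py_alt columns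
instance (columns : List String) (out : Option String) : Decidable (Spec_detect_vbs_column_py columns out) := by unfold Spec_detect_vbs_column_py; infer_instance

-- ===== CLAIM (what is proved, stated in full; the proofs are below) =====
def Claim_equal_detect_vbs_column_py : Prop := ∀ (columns : List String), Dom_detect_vbs_column_py columns → Spec_detect_vbs_column_py columns (detect_vbs_column_py columns)

-- ===== LEMMAS AND PROOFS =====

-- first column whose normalized form is k
def pvFindKey (k : String) (cols : List String) : Option String :=
  cols.find? (fun c => decide (pvNorm c = k))

-- priority chain of the four distinct normalized candidate keys, tagged with their ranks
def pvChain (cols : List String) : Option (Int × String) :=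
  ((pvFindKey "WBSNo." cols).map (fun c => ((0 : Int), c))).or
    (((pvFindKey "vbsno." cols).map (fun c => ((2 : Int), c))).or
      (((pvFindKey "vbsno" cols).map (fun c => ((3 : Int), c))).or
        ((pvFindKey "vbs" cols).map (fun c => ((5 : Int), c)))))

-- combine an already-found best with the best of the remaining suffix (earlier wins ties)
def pvMerge (acc b : Option (Int × String)) : Option (Int × String) :=
  match acc, b with
  | none, b => b
  | acc, none => acc
  | some (r, c), some (r', c') => if r' < r then some (r', c') else some (r, c)

theorem pvRanks_get? (k : String) :
    pvRanks.get? k =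
      if k = "WBSNo." then some 0 else if k = "vbsno." then some 2
      else if k = "vbsno" then some 3 else if k = "vbs" then some 5 else none := by
  have h : pvRanks = PySem.Dict.mk
      [("WBSNo.", (0 : Int)), ("vbsno.", 2), ("vbsno", 3), ("vbs", 5)] := by decide
  rw [h]
  simp only [PySem.Dict.get?_mk_cons, beq_iff_eq]
  by_cases h1 : k = "WBSNo."
  · simp [h1]
  rw [if_neg (fun h => h1 h.symm), if_neg h1]
  by_cases h2 : k = "vbsno."
  · simp [h2]
  rw [if_neg (fun h => h2 h.symm), if_neg h2]
  by_cases h3 : k = "vbsno"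
  · simp [h3]
  rw [if_neg (fun h => h3 h.symm), if_neg h3]
  by_cases h4 : k = "vbs"
  · simp [h4]
  rw [if_neg (fun h => h4 h.symm), if_neg h4]
  rfl

theorem pvFindKey_cons (k c : String) (cs : List String) :
    pvFindKey k (c :: cs) = if pvNorm c = k then some c else pvFindKey k cs := by
  simp [pvFindKey, List.find?_cons]
  split_ifs <;> simp_all

theorem pvMerge_assoc (a b c : Option (Int × String)) :
    pvMerge (pvMerge a b) c = pvMerge a (pvMerge b c) := by
  rcases a with _ | ⟨ra, ca⟩ <;> rcases b with _ | ⟨rb, cb⟩ <;> rcases c with _ | ⟨rc, cc⟩ <;>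
    simp only [pvMerge] <;> (try split_ifs) <;> (try simp only []) <;> (try split_ifs) <;>
    first | rfl | omega

theorem pvStep_eq (acc : Option (Int × String)) (c : String) :
    pvBStep acc c = pvMerge acc ((pvRanks.get? (pvNorm c)).map (fun r => (r, c))) := by
  rcases h : pvRanks.get? (pvNorm c) with _ | r <;>
    rcases acc with _ | ⟨ra, ca⟩ <;> simp [pvBStep, pvMerge, h]

theorem pvChain_cons (c : String) (cs : List String) :
    pvChain (c :: cs) = pvMerge ((pvRanks.get? (pvNorm c)).map (fun r => (r, c))) (pvChain cs) := by
  rw [pvRanks_get?]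
  by_cases k0 : pvNorm c = "WBSNo."
  · rcases h0 : pvFindKey "WBSNo." cs with _ | x0 <;>
      rcases h2 : pvFindKey "vbsno." cs with _ | x2 <;>
        rcases h3 : pvFindKey "vbsno" cs with _ | x3 <;>
          rcases h5 : pvFindKey "vbs" cs with _ | x5 <;>
            simp [pvChain, pvFindKey_cons, pvMerge, Option.or, k0, h0, h2, h3, h5]
  by_cases k2 : pvNorm c = "vbsno."
  · rcases h0 : pvFindKey "WBSNo." cs with _ | x0 <;>
      rcases h2 : pvFindKey "vbsno." cs with _ | x2 <;>
        rcases h3 : pvFindKey "vbsno" cs with _ | x3 <;>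
          rcases h5 : pvFindKey "vbs" cs with _ | x5 <;>
            simp [pvChain, pvFindKey_cons, pvMerge, Option.or, k2, h0, h2, h3, h5]
  by_cases k3 : pvNorm c = "vbsno"
  · rcases h0 : pvFindKey "WBSNo." cs with _ | x0 <;>
      rcases h2 : pvFindKey "vbsno." cs with _ | x2 <;>
        rcases h3 : pvFindKey "vbsno" cs with _ | x3 <;>
          rcases h5 : pvFindKey "vbs" cs with _ | x5 <;>
            simp [pvChain, pvFindKey_cons, pvMerge, Option.or, k3, h0, h2, h3, h5]
  by_cases k5 : pvNorm c = "vbs"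
  · rcases h0 : pvFindKey "WBSNo." cs with _ | x0 <;>
      rcases h2 : pvFindKey "vbsno." cs with _ | x2 <;>
        rcases h3 : pvFindKey "vbsno" cs with _ | x3 <;>
          rcases h5 : pvFindKey "vbs" cs with _ | x5 <;>
            simp [pvChain, pvFindKey_cons, pvMerge, Option.or, k5, h0, h2, h3, h5]
  · simp [pvChain, pvFindKey_cons, pvMerge, Option.or, k0, k2, k3, k5]

theorem pvFold_eq (cols : List String) :
    ∀ acc, cols.foldl pvBStep acc = pvMerge acc (pvChain cols) := by
  induction cols with
  | nil => intro acc; cases acc <;> simp [pvChain, pvFindKey, pvMerge]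
  | cons c cs ih =>
    intro acc
    rw [List.foldl_cons, ih, pvStep_eq, pvChain_cons, pvMerge_assoc]

theorem pvAScan_eq (cand : String) :
    ∀ (xs pre : List String),
      pvAScan (pre ++ xs) cand (PySem.List.enumerate (xs.map (fun c => pvStripLower c)) (pre.length : Int))
        = pvFindKey (pvRepl cand) xs := by
  intro xs
  induction xs with
  | nil => intro pre; simp [pvAScan, pvFindKey, PySem.List.enumerate_nil]
  | cons c r ih =>
    intro pre
    simp only [List.map_cons, PySem.List.enumerate_cons, pvAScan, pvFindKey, List.find?]
    have hiff : (cand = pvStripLower c ∨ pvRepl cand = pvRepl (pvStripLower c))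
        ↔ (pvNorm c = pvRepl cand) := by
      unfold pvNorm
      constructor
      · rintro (h | h)
        · rw [h]
        · exact h.symm
      · intro h; exact Or.inr h.symm
    by_cases h : pvNorm c = pvRepl cand
    · rw [if_pos (hiff.mpr h), PySem.List.pyGet?_append_length]
      simp [h]
    · rw [if_neg (fun hc => h (hiff.mp hc))]
      have := ih (pre ++ [c])
      simp only [List.append_assoc, List.singleton_append, List.length_append,
        List.length_singleton, Nat.cast_add, Nat.cast_one] at this
      rw [this]
      simp [pvFindKey, h]

-- ===== VERDICT (by name: the statement is the Claim_ definition above) =====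
theorem detect_vbs_column_py_spec : Claim_equal_detect_vbs_column_py := by
  intro columns _
  unfold Spec_detect_vbs_column_py detect_vbs_column_py detect_vbs_column_py_alt
  rw [pvFold_eq]
  have hscan : ∀ cand : String,
      pvAScan columns cand (PySem.List.enumerate (columns.map (fun c => pvStripLower c)) 0)
        = pvFindKey (pvRepl cand) columns := by
    intro cand
    have := pvAScan_eq cand columns []
    simpa using this
  simp only [pvALoop, hscan]
  have e0 : pvRepl "WBS No." = "WBSNo." := by decide
  have e2 : pvRepl "vbs no." = "vbsno." := by decide
  have e3 : pvRepl "vbsno" = "vbsno" := by decide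
  have e4 : pvRepl "vbs no" = "vbsno" := by decide
  have e5 : pvRepl "vbs" = "vbs" := by decide
  rw [e0, e2, e3, e4, e5]
  rcases h0 : pvFindKey "WBSNo." columns with _ | x0 <;>
    rcases h2 : pvFindKey "vbsno." columns with _ | x2 <;>
      rcases h3 : pvFindKey "vbsno" columns with _ | x3 <;>
        rcases h5 : pvFindKey "vbs" columns with _ | x5 <;>
          simp [pvChain, pvMerge, h0, h2, h3, h5, Option.or]
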